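-- pv_equiv track=rewrite | github.com/jopemachine/algorithm-study | baekjoon/Basic/1296.py | find_love
-- ===== SOURCE A (Python) =====
-- def find_love(name):
--     _l, o, v, e = [0, 0, 0, 0]
--
--     for ch in name:
--         if ch == 'L':
--             _l += 1
--         elif ch == 'O':
--             o += 1
--         elif ch == 'V':
--             v += 1
--         elif ch == 'E':
--             e += 1
--
--     return _l, o, v, e
-- ===== SOURCE B (Python) =====
-- def find_love(name):
--     return name.count('L'), name.count('O'), name.count('V'), name.count('E')
-- ===== Notes on version B (the rewrite author's own statement) =====
-- stated objective: idiomatic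
-- what changed: Replaces the single branched-accumulator loop with four independent staged str.count scans, one per letter, eliminating the accumulator state and branching entirely.
import Mathlib
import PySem

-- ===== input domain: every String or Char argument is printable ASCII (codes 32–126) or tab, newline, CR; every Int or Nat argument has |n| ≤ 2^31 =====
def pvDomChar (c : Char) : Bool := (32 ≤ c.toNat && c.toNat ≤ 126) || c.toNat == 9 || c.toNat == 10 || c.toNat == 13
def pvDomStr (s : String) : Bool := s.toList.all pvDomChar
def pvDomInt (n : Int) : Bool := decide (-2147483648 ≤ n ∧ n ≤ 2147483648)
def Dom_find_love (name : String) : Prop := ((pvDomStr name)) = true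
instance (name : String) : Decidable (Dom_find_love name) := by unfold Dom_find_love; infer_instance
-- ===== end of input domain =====

-- B replaces the single branched-accumulator loop with four independent str.count scans (idiomatic, same cost).

-- ===== PORT A =====
def find_love (name : String) : Int × Int × Int × Int :=
  name.toList.foldl
    (fun (st : Int × Int × Int × Int) ch =>
      let (_l, o, v, e) := st
      if ch = 'L' then (_l + 1, o, v, e)
      else if ch = 'O' then (_l, o + 1, v, e)
      else if ch = 'V' then (_l, o, v + 1, e)
      else if ch = 'E' then (_l, o, v, e + 1)
      else (_l, o, v, e))
    (0, 0, 0, 0)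

-- ===== PORT B =====
def find_love_alt (name : String) : Int × Int × Int × Int :=
  ((PySem.Str.count name "L" : Int), (PySem.Str.count name "O" : Int),
   (PySem.Str.count name "V" : Int), (PySem.Str.count name "E" : Int))

-- ===== PRECONDITION & SPEC =====
def Spec_find_love (name : String) (out : Int × Int × Int × Int) : Prop := out = find_love_alt name
instance (name : String) (out : Int × Int × Int × Int) : Decidable (Spec_find_love name out) := by unfold Spec_find_love; infer_instance

-- ===== CLAIM (what is proved, stated in full; the proofs are below) =====
def Claim_equal_find_love : Prop := ∀ (name : String), Dom_find_love name → Spec_find_love name (find_love name)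

-- ===== LEMMAS AND PROOFS =====

-- A's loop counts the four letters.
theorem find_love_foldl_counts (l : List Char) (a b c d : Int) :
    l.foldl
      (fun (st : Int × Int × Int × Int) ch =>
        let (_l, o, v, e) := st
        if ch = 'L' then (_l + 1, o, v, e)
        else if ch = 'O' then (_l, o + 1, v, e)
        else if ch = 'V' then (_l, o, v + 1, e)
        else if ch = 'E' then (_l, o, v, e + 1)
        else (_l, o, v, e))
      (a, b, c, d)
    = (a + l.count 'L', b + l.count 'O', c + l.count 'V', d + l.count 'E') := by
  induction l generalizing a b c d with
  | nil => simp
  | cons x xs ih =>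
    simp only [List.foldl_cons]
    by_cases hL : x = 'L'
    · subst hL; simp [ih]; ring
    · by_cases hO : x = 'O'
      · subst hO; simp [ih]; ring
      · by_cases hV : x = 'V'
        · subst hV; simp [hL, hO, ih]; ring
        · by_cases hE : x = 'E'
          · subst hE; simp [hL, hO, hV, ih]; ring
          · simp [hL, hO, hV, hE, ih]

-- Python's s.count(c) for a single character equals the character count.
theorem count_go_single (c : Char) (l : List Char) (fuel acc : Nat)
    (h : l.length ≤ fuel) :
    PySem.Chars.count.go [c] fuel l acc = acc + l.count c := by
  induction fuel generalizing l acc with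
  | zero =>
    have : l = [] := List.eq_nil_of_length_eq_zero (Nat.le_zero.mp h)
    subst this; simp [PySem.Chars.count.go]
  | succ n ih =>
    cases l with
    | nil => simp [PySem.Chars.count.go]
    | cons x xs =>
      simp only [PySem.Chars.count.go]
      by_cases hx : x = c
      · subst hx
        have : List.isPrefixOf [x] (x :: xs) = true := by
          simp [List.isPrefixOf]
        simp only [this]
        have hlen : xs.length ≤ n := by simpa using h
        simp [ih xs (acc + 1) hlen]
        omega
      · have : List.isPrefixOf [c] (x :: xs) = false := by
          simp [List.isPrefixOf]
          exact fun hc => (hx hc.symm).elim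
        simp only [this]
        have hlen : xs.length ≤ n := by
          have := h; simp at this; omega
        simp [ih xs acc hlen, hx]

theorem chars_count_single (c : Char) (l : List Char) :
    PySem.Chars.count l [c] = l.count c := by
  simp [PySem.Chars.count, count_go_single c l l.length 0 (le_refl _)]

-- ===== VERDICT (by name: the statement is the Claim_ definition above) =====
theorem find_love_spec : Claim_equal_find_love := by
  intro name _
  unfold Spec_find_love find_love find_love_alt
  have hc : ∀ (c : Char) (s : String),
      PySem.Str.count s (String.ofList [c]) = s.toList.count c := by
    intro c s
    simp [PySem.Str.count]
    exact chars_count_single c s.toList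
  rw [find_love_foldl_counts]
  have hL := hc 'L' name; have hO := hc 'O' name
  have hV := hc 'V' name; have hE := hc 'E' name
  simp only [show ("L" : String) = String.ofList ['L'] from rfl,
    show ("O" : String) = String.ofList ['O'] from rfl,
    show ("V" : String) = String.ofList ['V'] from rfl,
    show ("E" : String) = String.ofList ['E'] from rfl, hL, hO, hV, hE]
  simp
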